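-- pv_equiv track=rewrite | github.com/NicedeEric/leetcode_everyday | daily_leetcode/replace_number_20250506.py | subsitute_numbers
-- ===== SOURCE A (Python) =====
-- def subsitute_numbers(s):
--     """
--     :type s: str
--     :rtype: str
--     """
--
--     count = sum(1 for char in s if char.isdigit()) # 统计数字的个数
--     expand_len = len(s) + (count * 5)  # 计算扩充后字符串的大小， x->number， 每有一个数字就要增加五个长度
--     res = [''] * expand_len
--
--     new_index = expand_len - 1 # 指向扩充后字符串末尾
--     old_index = len(s) - 1 # 指向原字符串末尾
--
--     while old_index >= 0: # 从后往前， 遇到数字替换成“number”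
--         if s[old_index].isdigit():
--             res[new_index-5:new_index+1] = "number"
--             new_index -= 6
--         else:
--             res[new_index] = s[old_index]
--             new_index -= 1
--         old_index -= 1
--
--     return "".join(res)
-- ===== SOURCE B (Python) =====
-- def subsitute_numbers(s):
--     """
--     :type s: str
--     :rtype: str
--     """
--     return "".join("number" if c.isdigit() else c for c in s)
-- ===== Notes on version B (the rewrite author's own statement) =====
-- stated objective: simpler
-- what changed: Replaced the count-then-preallocate-then-backward-two-pointer fill with a single forward pass that joins the replacement word or the character itself per character.
import Mathlib
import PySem

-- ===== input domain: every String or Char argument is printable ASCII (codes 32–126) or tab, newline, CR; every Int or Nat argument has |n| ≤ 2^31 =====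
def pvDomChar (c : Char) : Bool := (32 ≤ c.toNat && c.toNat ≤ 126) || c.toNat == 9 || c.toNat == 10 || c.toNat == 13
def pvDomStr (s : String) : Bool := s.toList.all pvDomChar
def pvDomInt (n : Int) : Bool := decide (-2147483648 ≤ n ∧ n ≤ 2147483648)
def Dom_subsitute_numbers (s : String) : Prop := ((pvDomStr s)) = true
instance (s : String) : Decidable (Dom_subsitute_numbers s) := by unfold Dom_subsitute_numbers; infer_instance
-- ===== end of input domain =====

-- B replaces A's count/preallocate/backward-two-pointer fill with a single forward pass joining per-character pieces (objective: simpler).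

-- ===== PORT A =====
-- A's while loop; res is Python's list of strings.  The slice assignment
-- res[new_index-5:new_index+1] = "number" and the element assignment res[new_index] = s[old_index]
-- are ported by hand (take/++/drop, List.set); this is exact because A's loop only ever uses
-- in-range non-negative indices (the backward fill consumes exactly the preallocated length).
def pvALoop (chars : List Char) (res : List String) (newIndex oldIndex : Int) : List String :=
  if 0 ≤ oldIndex then
    -- s[old_index]; the default is unreachable since 0 ≤ oldIndex < chars.length in A's loop
    let c := (PySem.List.pyGet? chars oldIndex).getD ' '
    if PySem.Chars.isdigit c then
      pvALoop chars
        (res.take (newIndex - 5).toNat ++ ["n", "u", "m", "b", "e", "r"] ++ res.drop (newIndex + 1).toNat)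
        (newIndex - 6) (oldIndex - 1)
    else
      pvALoop chars (res.set newIndex.toNat (String.ofList [c])) (newIndex - 1) (oldIndex - 1)
  else res
termination_by (oldIndex + 1).toNat
decreasing_by all_goals omega

def subsitute_numbers (s : String) : String :=
  let chars := s.toList
  let count : Int := chars.foldl (fun acc c => if PySem.Chars.isdigit c then acc + 1 else acc) 0
  let expandLen : Int := (chars.length : Int) + count * 5
  let res : List String := PySem.List.pyRepeat [""] expandLen
  PySem.Str.join "" (pvALoop chars res (expandLen - 1) ((chars.length : Int) - 1))

-- ===== PORT B =====
def subsitute_numbers_alt (s : String) : String :=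
  PySem.Str.join ""
    (s.toList.map (fun c => if PySem.Chars.isdigit c then "number" else String.ofList [c]))

-- ===== PRECONDITION & SPEC =====
def Spec_subsitute_numbers (s : String) (out : String) : Prop := out = subsitute_numbers_alt s
instance (s : String) (out : String) : Decidable (Spec_subsitute_numbers s out) := by unfold Spec_subsitute_numbers; infer_instance

-- ===== CLAIM (what is proved, stated in full; the proofs are below) =====
def Claim_equal_subsitute_numbers : Prop := ∀ (s : String), Dom_subsitute_numbers s → Spec_subsitute_numbers s (subsitute_numbers s)

-- ===== LEMMAS AND PROOFS =====

-- A's per-character expansion: the strings the loop writes into res for one source character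
def pvGA (c : Char) : List String :=
  if PySem.Chars.isdigit c then ["n", "u", "m", "b", "e", "r"] else [String.ofList [c]]

theorem pvGA_len (c : Char) :
    ((pvGA c).length : Int) = 1 + (if PySem.Chars.isdigit c then (1 : Int) else 0) * 5 := by
  unfold pvGA; split_ifs <;> simp

-- expansion length = length + 5 * digit count (A's expand_len is exactly the expansion's size)
theorem pvExpandLen (l : List Char) :
    (((l.flatMap pvGA).length : Int)) = (l.length : Int) + (l.countP PySem.Chars.isdigit : Int) * 5 := by
  induction l with
  | nil => simp
  | cons c t ih =>
    have h1 : ((c :: t).flatMap pvGA).length = (pvGA c).length + (t.flatMap pvGA).length := by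
      simp
    rw [h1, Nat.cast_add, ih, List.countP_cons, List.length_cons]
    have := pvGA_len c
    by_cases h : PySem.Chars.isdigit c = true <;> simp [h] at this ⊢ <;> omega

-- main loop invariant: with i characters left to process and res = blanks sized for their
-- expansion followed by tail, the loop returns that expansion followed by tail
theorem pvALoop_inv (chars : List Char) :
    ∀ (i : Nat), i ≤ chars.length → ∀ (tail : List String),
      pvALoop chars (List.replicate ((chars.take i).flatMap pvGA).length "" ++ tail)
        ((((chars.take i).flatMap pvGA).length : Int) - 1) ((i : Int) - 1)
      = (chars.take i).flatMap pvGA ++ tail := by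
  intro i
  induction i with
  | zero =>
    intro _ tail
    rw [pvALoop]
    simp
  | succ n ih =>
    intro hle tail
    have hn : n < chars.length := by omega
    have htake : chars.take (n + 1) = chars.take n ++ [chars[n]] := by
      rw [List.take_add_one]
      simp [List.getElem?_eq_getElem hn]
    set E : Nat := ((chars.take n).flatMap pvGA).length with hE
    have hexp : (chars.take (n + 1)).flatMap pvGA = (chars.take n).flatMap pvGA ++ pvGA chars[n] := by
      rw [htake, List.flatMap_append]; simp
    rw [pvALoop]
    have h0 : (0 : Int) ≤ (↑(n + 1) : Int) - 1 := by push_cast; omega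
    have hget : PySem.List.pyGet? chars ((↑(n + 1) : Int) - 1) = some chars[n] := by
      have : ((↑(n + 1) : Int) - 1) = ((n : Nat) : Int) := by push_cast; omega
      rw [this, PySem.List.pyGet?_natCast, List.getElem?_eq_getElem hn]
    rw [if_pos h0]
    simp only [hget, Option.getD_some]
    by_cases hd : PySem.Chars.isdigit chars[n] = true
    · have hlen : ((chars.take (n + 1)).flatMap pvGA).length = E + 6 := by
        rw [hexp, List.length_append]
        have h6 : (pvGA chars[n]).length = 6 := by simp [pvGA, hd]
        omega
      rw [hlen, hexp, if_pos hd]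
      have e1 : ((↑(E + 6) : Int) - 1 - 5).toNat = E := by omega
      have e2 : ((↑(E + 6) : Int) - 1 + 1).toNat = E + 6 := by omega
      rw [e1, e2]
      have hrep : List.replicate (E + 6) "" = List.replicate E "" ++ List.replicate 6 "" := by
        rw [← List.replicate_add]
      have htk : (List.replicate (E + 6) "" ++ tail).take E = List.replicate E "" := by
        rw [hrep, List.append_assoc, List.take_append_of_le_length (by simp)]
        simp
      have hdr : (List.replicate (E + 6) "" ++ tail).drop (E + 6) = tail := by
        rw [List.drop_append_of_le_length (by simp)]
        simp
      rw [htk, hdr]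
      have harith : (↑(E + 6) : Int) - 1 - 6 = (E : Int) - 1 := by push_cast; omega
      have harith2 : (↑(n + 1) : Int) - 1 - 1 = (n : Int) - 1 := by push_cast; omega
      rw [harith, harith2]
      have h := ih (by omega) (["n", "u", "m", "b", "e", "r"] ++ tail)
      simp only [pvGA, hd, if_pos, List.append_assoc] at h ⊢
      simpa [List.append_assoc] using h
    · have hlen : ((chars.take (n + 1)).flatMap pvGA).length = E + 1 := by
        rw [hexp, List.length_append]
        have h1 : (pvGA chars[n]).length = 1 := by simp [pvGA, hd]
        omega
      rw [hlen, hexp, if_neg hd]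
      have e1 : ((↑(E + 1) : Int) - 1).toNat = E := by omega
      rw [e1]
      have hset : (List.replicate (E + 1) "" ++ tail).set E (String.ofList [chars[n]])
          = List.replicate E "" ++ (String.ofList [chars[n]] :: tail) := by
        have hrep : List.replicate (E + 1) "" = List.replicate E "" ++ [""] := by
          simp [List.replicate_succ']
        rw [hrep, List.append_assoc, List.set_append]
        simp
      rw [hset]
      have harith : (↑(E + 1) : Int) - 1 - 1 = (E : Int) - 1 := by push_cast; omega
      have harith2 : (↑(n + 1) : Int) - 1 - 1 = (n : Int) - 1 := by push_cast; omega
      rw [harith, harith2]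
      have h := ih (by omega) (String.ofList [chars[n]] :: tail)
      simpa [pvGA, hd, List.append_assoc] using h

-- "".join concatenates
theorem pvJoin0 (l : List (List Char)) : PySem.Chars.join [] l = l.flatten := by
  induction l with
  | nil => simp
  | cons h t ih =>
    cases t with
    | nil => simp [PySem.Chars.join, List.intercalate]
    | cons h2 t2 =>
      rw [PySem.Chars.join_cons_cons]
      simp [ih]

-- joining A's expansion list and joining B's per-character strings give the same characters
theorem pvJoin_eq (chars : List Char) :
    PySem.Chars.join [] ((chars.flatMap pvGA).map String.toList)
    = PySem.Chars.join []
        ((chars.map (fun c => if PySem.Chars.isdigit c then "number" else String.ofList [c])).map String.toList) := by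
  rw [pvJoin0, pvJoin0]
  induction chars with
  | nil => simp
  | cons c t ih =>
    simp only [List.flatMap_cons, List.map_cons, List.map_append, List.flatten_append,
      List.flatten_cons]
    rw [ih]
    by_cases hd : PySem.Chars.isdigit c = true <;> simp [pvGA, hd]

theorem subsitute_numbers_eq (s : String) : subsitute_numbers s = subsitute_numbers_alt s := by
  unfold subsitute_numbers subsitute_numbers_alt
  simp only
  rw [PySem.List.foldl_if_add_one]
  have hE := pvExpandLen s.toList
  have hrep : PySem.List.pyRepeat [""]
      ((s.toList.length : Int) + (0 + (s.toList.countP PySem.Chars.isdigit : Int)) * 5)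
      = List.replicate ((s.toList.flatMap pvGA).length) "" := by
    rw [PySem.List.pyRepeat_singleton]
    congr 1
    omega
  rw [hrep]
  have harith : ((s.toList.length : Int) + (0 + (s.toList.countP PySem.Chars.isdigit : Int)) * 5) - 1
      = ((s.toList.flatMap pvGA).length : Int) - 1 := by omega
  rw [harith]
  have hloop := pvALoop_inv s.toList s.toList.length (le_refl _) []
  simp only [List.take_length, List.append_nil] at hloop
  rw [hloop]
  apply String.toList_inj.mp
  rw [PySem.Str.toList_join, PySem.Str.toList_join]
  simpa using pvJoin_eq s.toList

-- ===== VERDICT (by name: the statement is the Claim_ definition above) =====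
theorem subsitute_numbers_spec : Claim_equal_subsitute_numbers := by
  intro s _
  unfold Spec_subsitute_numbers
  exact subsitute_numbers_eq s
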